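-- pv_equiv track=rewrite | github.com/alvii147/leetcode | Algorithms/68_Text_Justification/Python/Solution.py | maxWordFit
-- ===== SOURCE A (Python) =====
-- from typing import List
--
-- def maxWordFit(words: List[str], maxWidth: int) -> int:
--     '''
--     Counts maximum number of words that would fit in a line.
--     '''
--     wordCount = 0
--     lineLength = 0
--     for word in words:
--         wordLen = len(word)
--         if lineLength + wordLen > maxWidth:
--             break
--
--         wordCount += 1
--         lineLength += wordLen + 1
--
--     return wordCount
-- ===== SOURCE B (Python) =====
-- from typing import List
--
-- def maxWordFit(words: List[str], maxWidth: int) -> int: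
--     '''
--     Counts maximum number of words that would fit in a line.
--
--     Builds a prefix-sum array of word lengths, then binary-searches for the
--     first index j whose fit condition prefix[j+1] + j <= maxWidth fails
--     (the quantity is strictly increasing in j, so the predicate is monotone).
--     '''
--     prefix = [0]
--     total = 0
--     for w in words:
--         total += len(w)
--         prefix.append(total)
--     lo, hi = 0, len(words)
--     while lo < hi:
--         mid = (lo + hi) // 2
--         if prefix[mid + 1] + mid <= maxWidth:
--             lo = mid + 1
--         else:
--             hi = mid
--     return lo
-- ===== Notes on version B (the rewrite author's own statement) =====
-- stated objective: alternative
-- what changed: Replaces the running-total scan with break by a prefix-sum array plus a binary search for the first index whose fit condition prefix[j+1]+j <= maxWidth fails.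
import Mathlib
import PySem

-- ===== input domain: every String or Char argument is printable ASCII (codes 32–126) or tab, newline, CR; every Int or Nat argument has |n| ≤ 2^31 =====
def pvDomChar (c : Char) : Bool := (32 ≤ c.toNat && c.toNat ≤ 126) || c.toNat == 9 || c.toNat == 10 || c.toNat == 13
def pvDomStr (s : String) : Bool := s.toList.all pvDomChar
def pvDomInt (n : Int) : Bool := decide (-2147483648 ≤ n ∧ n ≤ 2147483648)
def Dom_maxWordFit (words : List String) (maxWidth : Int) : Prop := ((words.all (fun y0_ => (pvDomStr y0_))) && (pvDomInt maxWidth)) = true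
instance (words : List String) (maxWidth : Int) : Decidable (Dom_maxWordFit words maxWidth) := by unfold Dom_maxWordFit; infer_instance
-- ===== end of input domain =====

-- B replaces A's running-total scan by a prefix-sum array plus a binary search
-- for the first index whose fit condition fails (alternative decomposition, same cost class).

-- Python len(word) on a str: number of characters (exact).
def pyLen (s : String) : Int := (s.toList.length : Int)

-- ===== PORT A =====
-- the for-loop of A with its state (wordCount, lineLength); `break` = return wordCount
def maxWordFitLoop : List String → Int → Int → Int → Int
  | [], _, wordCount, _ => wordCount
  | w :: ws, maxWidth, wordCount, lineLength =>
    if lineLength + pyLen w > maxWidth then wordCount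
    else maxWordFitLoop ws maxWidth (wordCount + 1) (lineLength + pyLen w + 1)

def maxWordFit (words : List String) (maxWidth : Int) : Int :=
  maxWordFitLoop words maxWidth 0 0

-- ===== PORT B =====
-- prefix-sum tail: prefixFrom total ws = the entries appended after `total` so far
def prefixFrom : Int → List String → List Int
  | _, [] => []
  | total, w :: ws => (total + pyLen w) :: prefixFrom (total + pyLen w) ws

-- the while-loop of Source B; lo/hi are nonnegative Python ints, ported as Nat so
-- (lo + hi) // 2 is exactly Nat division (both agree on nonnegative operands);
-- prefix[mid + 1] is always in range, so List.getD is exact there.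
def bsLoop (pfx : List Int) (maxWidth : Int) (lo hi : Nat) : Nat :=
  if _h : lo < hi then
    let mid := (lo + hi) / 2
    if pfx.getD (mid + 1) 0 + (mid : Int) ≤ maxWidth then
      bsLoop pfx maxWidth (mid + 1) hi
    else
      bsLoop pfx maxWidth lo mid
  else lo
termination_by hi - lo
decreasing_by all_goals omega

def maxWordFit_alt (words : List String) (maxWidth : Int) : Int :=
  let pfx := 0 :: prefixFrom 0 words
  ((bsLoop pfx maxWidth 0 words.length : Nat) : Int)

-- ===== PRECONDITION & SPEC =====
def Spec_maxWordFit (words : List String) (maxWidth : Int) (out : Int) : Prop := out = maxWordFit_alt words maxWidth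
instance (words : List String) (maxWidth : Int) (out : Int) : Decidable (Spec_maxWordFit words maxWidth out) := by unfold Spec_maxWordFit; infer_instance

-- ===== CLAIM (what is proved, stated in full; the proofs are below) =====
def Claim_equal_maxWordFit : Prop := ∀ (words : List String) (maxWidth : Int), Dom_maxWordFit words maxWidth → Spec_maxWordFit words maxWidth (maxWordFit words maxWidth)

-- ===== LEMMAS AND PROOFS =====

-- proof-side count: what A's loop adds to wordCount, as a Nat
def countFit : List String → Int → Int → Nat
  | [], _, _ => 0
  | w :: ws, maxWidth, lineLength =>
    if lineLength + pyLen w > maxWidth then 0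
    else 1 + countFit ws maxWidth (lineLength + pyLen w + 1)

-- sum of the lengths of the first j words
def sumLen (ws : List String) (j : Nat) : Int := ((ws.take j).map pyLen).sum

lemma pyLen_nonneg (s : String) : 0 ≤ pyLen s := by
  simp [pyLen]

lemma sumLen_nonneg (ws : List String) (j : Nat) : 0 ≤ sumLen ws j := by
  unfold sumLen
  induction ws.take j with
  | nil => simp
  | cons w t ih =>
    simp only [List.map_cons, List.sum_cons]
    have := pyLen_nonneg w
    omega

lemma sumLen_zero (ws : List String) : sumLen ws 0 = 0 := by simp [sumLen]

lemma sumLen_succ_cons (w : String) (ws : List String) (j : Nat) :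
    sumLen (w :: ws) (j + 1) = pyLen w + sumLen ws j := by
  simp [sumLen]

lemma loop_eq_count (ws : List String) (mw : Int) : ∀ wc ll,
    maxWordFitLoop ws mw wc ll = wc + (countFit ws mw ll : Int) := by
  induction ws with
  | nil => intro wc ll; simp [maxWordFitLoop, countFit]
  | cons w t ih =>
    intro wc ll
    simp only [maxWordFitLoop, countFit]
    split
    · simp
    · rw [ih]; push_cast; ring

lemma countFit_le_length (ws : List String) : ∀ mw ll, countFit ws mw ll ≤ ws.length := by
  induction ws with
  | nil => intro mw ll; simp [countFit]
  | cons w t ih =>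
    intro mw ll
    simp only [countFit, List.length_cons]
    split
    · omega
    · have := ih mw (ll + pyLen w + 1); omega

-- the characterization: word j fits iff j < countFit
lemma count_iff (ws : List String) : ∀ (mw ll : Int) (j : Nat), j < ws.length →
    ((sumLen ws (j + 1) + (j : Int) + ll ≤ mw) ↔ j < countFit ws mw ll) := by
  induction ws with
  | nil => intro mw ll j h; simp at h
  | cons w t ih =>
    intro mw ll j hj
    simp only [countFit]
    cases j with
    | zero =>
      rw [sumLen_succ_cons, sumLen_zero]
      split <;> rename_i hcond
      · constructor
        · intro h; omega
        · intro h; omega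
      · constructor
        · intro _; omega
        · intro _; omega
    | succ j' =>
      have hj' : j' < t.length := by simpa using hj
      rw [sumLen_succ_cons]
      split <;> rename_i hcond
      · constructor
        · intro h
          have h1 := sumLen_nonneg t (j' + 1)
          omega
        · intro h; omega
      · have := ih mw (ll + pyLen w + 1) j' hj'
        constructor
        · intro h
          have : j' < countFit t mw (ll + pyLen w + 1) := by
            apply (ih mw (ll + pyLen w + 1) j' hj').mp
            push_cast at h ⊢
            omega
          omega
        · intro h
          have h2 : j' < countFit t mw (ll + pyLen w + 1) := by omega
          have := (ih mw (ll + pyLen w + 1) j' hj').mpr h2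
          push_cast at this ⊢
          omega

-- the prefix list computes sumLen
lemma prefixFrom_getD (ws : List String) : ∀ (t : Int) (j : Nat), j < ws.length →
    (prefixFrom t ws).getD j 0 = t + sumLen ws (j + 1) := by
  induction ws with
  | nil => intro t j h; simp at h
  | cons w tl ih =>
    intro t j hj
    cases j with
    | zero => simp [prefixFrom, sumLen_succ_cons, sumLen_zero]
    | succ j' =>
      have hj' : j' < tl.length := by simpa using hj
      simp only [prefixFrom, List.getD_cons_succ]
      rw [ih (t + pyLen w) j' hj', sumLen_succ_cons]
      ring

-- binary-search correctness: if the predicate is true exactly below k, bsLoop finds k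
lemma bs_correct (pfx : List Int) (mw : Int) (k n : Nat)
    (hq : ∀ j, j < n → ((pfx.getD (j + 1) 0 + (j : Int) ≤ mw) ↔ j < k)) :
    ∀ (d lo hi : Nat), hi - lo ≤ d → lo ≤ k → k ≤ hi → hi ≤ n →
      bsLoop pfx mw lo hi = k := by
  intro d
  induction d with
  | zero =>
    intro lo hi hd h1 h2 h3
    rw [bsLoop]
    have : ¬ lo < hi := by omega
    simp [this]
    omega
  | succ d ih =>
    intro lo hi hd h1 h2 h3
    rw [bsLoop]
    by_cases hlt : lo < hi
    · simp only [hlt, dif_pos]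
      have hmid₁ : lo ≤ (lo + hi) / 2 := by omega
      have hmid₂ : (lo + hi) / 2 < hi := by omega
      have hmidn : (lo + hi) / 2 < n := by omega
      have hQ := hq ((lo + hi) / 2) hmidn
      split <;> rename_i hc
      · have hk : (lo + hi) / 2 < k := hQ.mp hc
        exact ih ((lo + hi) / 2 + 1) hi (by omega) (by omega) h2 h3
      · have hk : ¬ (lo + hi) / 2 < k := fun h => hc (hQ.mpr h)
        exact ih lo ((lo + hi) / 2) (by omega) h1 (by omega) (by omega)
    · simp [hlt]; omega

-- ===== VERDICT (by name: the statement is the Claim_ definition above) =====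
theorem maxWordFit_spec : Claim_equal_maxWordFit := by
  intro words maxWidth _
  unfold Spec_maxWordFit maxWordFit
  rw [loop_eq_count]
  show _ = ((bsLoop (0 :: prefixFrom 0 words) maxWidth 0 words.length : Nat) : Int)
  have hq : ∀ j, j < words.length →
      (((0 :: prefixFrom 0 words).getD (j + 1) 0 + (j : Int) ≤ maxWidth) ↔
        j < countFit words maxWidth 0) := by
    intro j hj
    rw [List.getD_cons_succ, prefixFrom_getD words 0 j hj]
    have := count_iff words maxWidth 0 j hj
    constructor
    · intro h; apply this.mp; omega
    · intro h; have := this.mpr h; omega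
  rw [bs_correct (0 :: prefixFrom 0 words) maxWidth (countFit words maxWidth 0)
      words.length hq words.length 0 words.length (by omega) (by omega)
      (countFit_le_length words maxWidth 0) (le_refl _)]
  simp
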